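-- pv_equiv track=rewrite | github.com/trevzhang/python-doodle | FNVHash/FNVHash.py | standard_fnv
-- ===== SOURCE A (Python) =====
-- def standard_fnv(key: str) -> int:
--     FNV_PRIME = 0x01000193
--     OFFSET_BASIS = 0x7ee36237
--
--     hash_val = OFFSET_BASIS
--     for c in key:
--         hash_val ^= ord(c)
--         hash_val *= FNV_PRIME
--     return hash_val & 0x7FFFFFFF
-- ===== SOURCE B (Python) =====
-- def standard_fnv(key: str) -> int:
--     FNV_PRIME = 0x01000193
--     OFFSET_BASIS = 0x7ee36237
--
--     # divide and conquer: hash the left half, then feed that state into the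
--     # right half; recursion depth is O(log n), no mutable loop variable
--     def go(s: str, h: int) -> int:
--         n = len(s)
--         if n == 0:
--             return h
--         if n == 1:
--             return (h ^ ord(s)) * FNV_PRIME
--         k = n // 2
--         return go(s[k:], go(s[:k], h))
--
--     return go(key, OFFSET_BASIS) & 0x7FFFFFFF
-- ===== Notes on version B (the rewrite author's own statement) =====
-- stated objective: alternative
-- what changed: Replaces the mutating left-to-right loop by a divide-and-conquer recursion: the string is split in half, the left half is hashed first and its state is threaded into the right half (depth O(log n)), masking once at the end.
import Mathlib
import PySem

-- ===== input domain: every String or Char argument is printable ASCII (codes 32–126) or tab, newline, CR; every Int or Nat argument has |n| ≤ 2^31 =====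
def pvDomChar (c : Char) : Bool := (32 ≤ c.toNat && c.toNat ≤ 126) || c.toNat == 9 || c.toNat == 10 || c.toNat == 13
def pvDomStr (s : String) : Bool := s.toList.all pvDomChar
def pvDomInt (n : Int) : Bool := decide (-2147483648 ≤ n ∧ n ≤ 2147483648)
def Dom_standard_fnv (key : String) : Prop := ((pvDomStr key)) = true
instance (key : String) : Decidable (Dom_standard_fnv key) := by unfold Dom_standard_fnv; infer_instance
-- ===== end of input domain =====

-- B replaces A's mutating left-to-right loop by a divide-and-conquer recursion over string halves (same hash values, alternative structure, no speed claim).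


-- ===== PORT A =====
-- literal port: hash_val starts at OFFSET_BASIS, the loop xors ord(c) then multiplies, final mask
def standard_fnv (key : String) : Int :=
  (key.toList.foldl (fun hash_val c =>
      (Int.xor hash_val (c.toNat : Int)) * 0x01000193) 0x7ee36237).land 0x7FFFFFFF

-- ===== PORT B =====
-- port of Source B's recursive helper go: split in half, hash the left, thread its state into the right
def fnvGo : List Char → Int → Int
  | [], h => h
  | [c], h => (Int.xor h (c.toNat : Int)) * 0x01000193
  | a :: b :: rest, h =>
      let l := a :: b :: rest
      let k := l.length / 2
      fnvGo (l.drop k) (fnvGo (l.take k) h)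
  termination_by l => l.length
  decreasing_by
  · simp [List.length_take]; omega
  · simp [List.length_drop]; omega

def standard_fnv_alt (key : String) : Int :=
  (fnvGo key.toList 0x7ee36237).land 0x7FFFFFFF

-- ===== PRECONDITION & SPEC =====
def Spec_standard_fnv (key : String) (out : Int) : Prop := out = standard_fnv_alt key
instance (key : String) (out : Int) : Decidable (Spec_standard_fnv key out) := by unfold Spec_standard_fnv; infer_instance

-- ===== CLAIM (what is proved, stated in full; the proofs are below) =====
def Claim_equal_standard_fnv : Prop := ∀ (key : String), Dom_standard_fnv key → Spec_standard_fnv key (standard_fnv key)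

-- ===== LEMMAS AND PROOFS =====
theorem fnvGo_eq_foldl (l : List Char) (h : Int) :
    fnvGo l h = l.foldl (fun a c => (Int.xor a (c.toNat : Int)) * 0x01000193) h := by
  induction l, h using fnvGo.induct with
  | case1 => simp [fnvGo]
  | case2 c => simp [fnvGo]
  | case3 a b rest h l k ihA ihB ihC =>
      rw [fnvGo, ihC, ihA, ← List.foldl_append, List.take_append_drop]

-- ===== VERDICT (by name: the statement is the Claim_ definition above) =====
theorem standard_fnv_spec : Claim_equal_standard_fnv := by
  intro key _
  unfold Spec_standard_fnv standard_fnv standard_fnv_alt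
  rw [fnvGo_eq_foldl]
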